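-- pv_equiv track=rewrite | github.com/Halftruth08/Game_AI | codenames/data_collection.py | targetlist_update2
-- ===== SOURCE A (Python) =====
-- def targetlist_update2(bigrams,targs,nlevels):
--     bg3 = {}
--     #    bigs=[]
--     #    nums=[]
--     targetlist = []
--     for i2 in bigrams.keys():
--         bg3[i2]={}
--         mincut= max([item for sublist in list(bigrams[i2].values()) for item in sublist])//(nlevels+1)
--         for i3 in bigrams[i2].keys():
--             if max(bigrams[i2][i3]) > mincut:
--                 bg3[i2][i3] = bigrams[i2][i3]
--     for i2 in bg3.keys():
--         #        m=dc.get(i,0)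
--         #        if not m == 0:
--         tl = []
--         for i3 in bg3[i2]:  # get the number of times better collocation is found
--             temp = max(bg3.get(i2,0).get(i3,0))
--             if not temp == 0:
--                 tl.append((temp, i3))
--                 if not i3 in bg3.keys():
--                     targetlist.append(i3)
--         tl.sort(key=lambda x: x[0], reverse=True)
--         if not len(tl) == 0:
--             targs[i2] = tl
--     return targs,targetlist
-- ===== SOURCE B (Python) =====
-- def targetlist_update2(bigrams, targs, nlevels):
--     targetlist = []
--     for i2, inner in bigrams.items():
--         mincut = max([v for sub in inner.values() for v in sub]) // (nlevels + 1)
--         tl = []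
--         for i3, sub in inner.items():
--             m = max(sub)
--             if m > mincut and m != 0:
--                 tl.append((m, i3))
--                 if i3 not in bigrams:
--                     targetlist.append(i3)
--         tl.sort(key=lambda x: x[0], reverse=True)
--         if tl:
--             targs[i2] = tl
--     return targs, targetlist
-- ===== Notes on version B (the rewrite author's own statement) =====
-- stated objective: simpler
-- what changed: B deletes the whole first pass and the intermediate filtered dict bg3: one fused loop over bigrams computes mincut once per key, keeps entries with max>mincut and max!=0 directly (computing each max once instead of twice), and tests membership against bigrams itself since bg3 always has exactly bigrams' keys.
import Mathlib
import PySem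

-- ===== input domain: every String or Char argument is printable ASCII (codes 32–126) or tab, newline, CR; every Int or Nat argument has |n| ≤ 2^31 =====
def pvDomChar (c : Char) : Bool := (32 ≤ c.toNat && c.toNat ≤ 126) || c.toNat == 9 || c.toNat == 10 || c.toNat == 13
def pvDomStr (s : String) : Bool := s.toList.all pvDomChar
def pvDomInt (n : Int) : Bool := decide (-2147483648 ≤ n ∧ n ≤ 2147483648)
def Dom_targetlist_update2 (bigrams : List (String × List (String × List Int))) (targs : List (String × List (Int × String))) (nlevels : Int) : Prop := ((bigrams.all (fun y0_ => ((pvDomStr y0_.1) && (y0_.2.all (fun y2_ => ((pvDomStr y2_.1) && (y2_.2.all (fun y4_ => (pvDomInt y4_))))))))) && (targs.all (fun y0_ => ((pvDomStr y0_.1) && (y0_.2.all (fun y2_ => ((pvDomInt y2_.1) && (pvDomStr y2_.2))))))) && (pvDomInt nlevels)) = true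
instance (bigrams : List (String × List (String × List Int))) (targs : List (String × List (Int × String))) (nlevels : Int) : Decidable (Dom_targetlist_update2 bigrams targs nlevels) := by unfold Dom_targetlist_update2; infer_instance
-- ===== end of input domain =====

-- B drops the intermediate filtered dict bg3 and does one fused pass over bigrams (objective: simpler).
-- Both Pythons mutate `targs` in place identically (the same dict assignments); the theorems are about the return value.

-- ===== PORT A =====
-- max(xs) (raises on []; Pre_ excludes the empty case, the default is never seen inside Pre_)
def pvMaxD (xs : List Int) : Int := (PySem.List.max? xs (fun x => x)).getD 0

-- mincut = max([item for sublist in list(bigrams[i2].values()) for item in sublist]) // (nlevels+1)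
def pvMincutA (nlevels : Int) (l : List (String × List Int)) : Int :=
  PySem.Int.floordiv (pvMaxD ((l.map Prod.snd).flatten)) (nlevels + 1)

-- inner loop of the first pass: bg3[i2][i3] = bigrams[i2][i3] when max(bigrams[i2][i3]) > mincut
def pvInnerA (mincut : Int) (l : List (String × List Int)) : PySem.Dict String (List Int) :=
  l.foldl (fun inner q => if pvMaxD q.2 > mincut then inner.insert q.1 q.2 else inner) PySem.Dict.empty

-- first pass: build bg3
def pvBg3 (bigrams : List (String × List (String × List Int))) (nlevels : Int) : PySem.Dict String (PySem.Dict String (List Int)) :=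
  bigrams.foldl (fun bg3 p => bg3.insert p.1 (pvInnerA (pvMincutA nlevels p.2) p.2)) PySem.Dict.empty

-- body of the second pass (one i2 of bg3): build tl, extend targetlist, sort, update targs
def pvStepA (bg3 : PySem.Dict String (PySem.Dict String (List Int)))
    (st : PySem.Dict String (List (Int × String)) × List String)
    (p : String × PySem.Dict String (List Int)) :
    PySem.Dict String (List (Int × String)) × List String :=
  let acc := p.2.items.foldl (fun (acc : List (Int × String) × List String) (q : String × List Int) =>
      if pvMaxD q.2 ≠ 0 then
        (acc.1 ++ [(pvMaxD q.2, q.1)],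
         if bg3.contains q.1 = false then acc.2 ++ [q.1] else acc.2)
      else acc) ([], st.2)
  let tl := PySem.List.sorted acc.1 (fun x => x.1) true
  if tl.length ≠ 0 then (st.1.insert p.1 tl, acc.2) else (st.1, acc.2)

def targetlist_update2 (bigrams : List (String × List (String × List Int))) (targs : List (String × List (Int × String))) (nlevels : Int) : (List (String × List (Int × String))) × List String :=
  let bg3 := pvBg3 bigrams nlevels
  let st := bg3.items.foldl (pvStepA bg3) (PySem.Dict.mk targs, [])
  (st.1.items, st.2)

-- ===== PORT B =====
-- B's body for one i2: compute mincut once, one fused loop over bigrams[i2], sort, update targs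
def pvStepB (bigkeys : List String) (nlevels : Int)
    (st : PySem.Dict String (List (Int × String)) × List String)
    (p : String × List (String × List Int)) :
    PySem.Dict String (List (Int × String)) × List String :=
  let mincut := PySem.Int.floordiv (pvMaxD (p.2.flatMap Prod.snd)) (nlevels + 1)
  let acc := p.2.foldl (fun (acc : List (Int × String) × List String) (q : String × List Int) =>
      let m := pvMaxD q.2
      if m > mincut ∧ m ≠ 0 then
        (acc.1 ++ [(m, q.1)],
         if q.1 ∈ bigkeys then acc.2 else acc.2 ++ [q.1])
      else acc) ([], st.2)
  let tl := PySem.List.sorted acc.1 (fun x => x.1) true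
  if tl = [] then (st.1, acc.2) else (st.1.insert p.1 tl, acc.2)

def targetlist_update2_alt (bigrams : List (String × List (String × List Int))) (targs : List (String × List (Int × String))) (nlevels : Int) : (List (String × List (Int × String))) × List String :=
  let st := bigrams.foldl (pvStepB (bigrams.map Prod.fst) nlevels) (PySem.Dict.mk targs, [])
  (st.1.items, st.2)

-- ===== PRECONDITION & SPEC =====
-- Pre_ admits exactly the inputs on which the Python A returns: every inner dict nonempty with nonempty value
-- lists (else max([]) raises ValueError) and nlevels ≠ -1 when any division happens (else ZeroDivisionError);
-- the Nodup conditions only rule out association lists that cannot arise from a Python dict (unique keys).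
def Pre_targetlist_update2 (bigrams : List (String × List (String × List Int))) (targs : List (String × List (Int × String))) (nlevels : Int) : Prop :=
  (bigrams ≠ [] → nlevels + 1 ≠ 0) ∧
  (∀ p ∈ bigrams, p.2 ≠ [] ∧ ∀ q ∈ p.2, q.2 ≠ []) ∧
  (bigrams.map Prod.fst).Nodup ∧
  (∀ p ∈ bigrams, (p.2.map Prod.fst).Nodup) ∧
  (targs.map Prod.fst).Nodup
instance (bigrams : List (String × List (String × List Int))) (targs : List (String × List (Int × String))) (nlevels : Int) : Decidable (Pre_targetlist_update2 bigrams targs nlevels) := by unfold Pre_targetlist_update2; infer_instance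

def pvWitness_targetlist_update2 : (List (String × List (String × List Int))) × (List (String × List (Int × String))) × Int :=
  ([("a", [("b", [3, 1]), ("c", [0, 5])]), ("x", [("a", [2])])], [("z", [(1, "q")])], 1)

def Spec_targetlist_update2 (bigrams : List (String × List (String × List Int))) (targs : List (String × List (Int × String))) (nlevels : Int) (out : (List (String × List (Int × String))) × List String) : Prop := out = targetlist_update2_alt bigrams targs nlevels
instance (bigrams : List (String × List (String × List Int))) (targs : List (String × List (Int × String))) (nlevels : Int) (out : (List (String × List (Int × String))) × List String) : Decidable (Spec_targetlist_update2 bigrams targs nlevels out) := by unfold Spec_targetlist_update2; infer_instance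

-- ===== CLAIM (what is proved, stated in full; the proofs are below) =====
def Claim_equal_targetlist_update2 : Prop := ∀ (bigrams : List (String × List (String × List Int))) (targs : List (String × List (Int × String))) (nlevels : Int), Dom_targetlist_update2 bigrams targs nlevels → Pre_targetlist_update2 bigrams targs nlevels → Spec_targetlist_update2 bigrams targs nlevels (targetlist_update2 bigrams targs nlevels)

-- ===== LEMMAS AND PROOFS =====

-- a fold inserting (filtered) pairs with fresh distinct keys appends the kept pairs to items
theorem pv_foldl_filter_insert_items {κ ν : Type} [BEq κ] [LawfulBEq κ]
    (c : κ × ν → Prop) [DecidablePred c] (l : List (κ × ν)) (d : PySem.Dict κ ν)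
    (hd : ∀ q ∈ l, d.contains q.1 = false) (hn : (l.map Prod.fst).Nodup) :
    (l.foldl (fun d q => if c q then d.insert q.1 q.2 else d) d).items
      = d.items ++ l.filter (fun q => decide (c q)) := by
  induction l generalizing d with
  | nil => simp
  | cons q l ih =>
    simp only [List.map_cons, List.nodup_cons] at hn
    by_cases hc : c q
    · have hq : d.contains q.1 = false := hd q (List.mem_cons_self ..)
      have hstep : ∀ q' ∈ l, (d.insert q.1 q.2).contains q'.1 = false := by
        intro q' hq'
        have hne : q'.1 ≠ q.1 := fun h => hn.1 (h ▸ List.mem_map_of_mem hq')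
        rw [PySem.Dict.contains_insert]
        simp [hne, hd q' (List.mem_cons_of_mem _ hq')]
      rw [List.foldl_cons, if_pos hc, ih _ hstep hn.2,
          PySem.Dict.items_insert_of_not_contains (h := hq)]
      simp [hc]
    · rw [List.foldl_cons, if_neg hc, ih _ (fun q' h => hd q' (List.mem_cons_of_mem _ h)) hn.2]
      simp [hc]

-- folding a filtered list with a guarded step = folding the whole list with the fused guard
theorem pv_foldl_filter_fuse {α β : Type} (c : α → Prop) [DecidablePred c] (P : α → Prop) [DecidablePred P]
    (f : β → α → β) (l : List α) (a : β) :
    (l.filter (fun q => decide (c q))).foldl (fun acc q => if P q then f acc q else acc) a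
      = l.foldl (fun acc q => if c q ∧ P q then f acc q else acc) a := by
  induction l generalizing a with
  | nil => rfl
  | cons q l ih =>
    by_cases hc : c q
    · by_cases hp : P q
      · simp [hc, hp, ih]
      · simp [hc, hp, ih]
    · simp [hc, ih]

theorem pv_innerA_items (m : Int) (l : List (String × List Int)) (hnd : (l.map Prod.fst).Nodup) :
    (pvInnerA m l).items = l.filter (fun q => decide (pvMaxD q.2 > m)) := by
  have h := pv_foldl_filter_insert_items (c := fun q => pvMaxD q.2 > m) l PySem.Dict.empty
      (by intro q _; simp [PySem.Dict.contains_empty]) hnd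
  simpa [pvInnerA] using h

theorem pv_bg3_items (bigrams : List (String × List (String × List Int))) (nlevels : Int)
    (hnd : (bigrams.map Prod.fst).Nodup) :
    (pvBg3 bigrams nlevels).items
      = bigrams.map (fun p => (p.1, pvInnerA (pvMincutA nlevels p.2) p.2)) := by
  have h := PySem.Dict.items_foldl_insert_fresh (l := bigrams) (k := Prod.fst)
      (v := fun p => pvInnerA (pvMincutA nlevels p.2) p.2) (d := PySem.Dict.empty)
      (by intro a _; simp [PySem.Dict.contains_empty]) hnd
  simpa [pvBg3] using h

theorem pv_bg3_contains (bigrams : List (String × List (String × List Int))) (nlevels : Int)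
    (hnd : (bigrams.map Prod.fst).Nodup) (k : String) :
    (pvBg3 bigrams nlevels).contains k = decide (k ∈ bigrams.map Prod.fst) := by
  rw [PySem.Dict.contains_eq_decide_mem_keys]
  have : (pvBg3 bigrams nlevels).keys = bigrams.map Prod.fst := by
    show (pvBg3 bigrams nlevels).items.map Prod.fst = _
    rw [pv_bg3_items bigrams nlevels hnd, List.map_map]
    simp [Function.comp_def]
  rw [this]

theorem pv_if_flip {α β : Type} (tl : List β) (x y : α) :
    (if tl.length ≠ 0 then x else y) = (if tl = [] then y else x) := by
  by_cases h : tl = [] <;> simp [h]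

theorem pv_step_eq (bigrams : List (String × List (String × List Int))) (nlevels : Int)
    (hnd : (bigrams.map Prod.fst).Nodup)
    (p : String × List (String × List Int)) (hp : (p.2.map Prod.fst).Nodup)
    (st : PySem.Dict String (List (Int × String)) × List String) :
    pvStepA (pvBg3 bigrams nlevels) st (p.1, pvInnerA (pvMincutA nlevels p.2) p.2)
      = pvStepB (bigrams.map Prod.fst) nlevels st p := by
  simp only [pvStepA, pvStepB]
  have hmc : PySem.Int.floordiv (pvMaxD (p.2.flatMap Prod.snd)) (nlevels + 1)
      = pvMincutA nlevels p.2 := by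
    simp [pvMincutA, List.flatMap_def]
  rw [hmc]
  rw [pv_innerA_items _ _ hp]
  have h1 := pv_foldl_filter_fuse (fun q => pvMaxD q.2 > pvMincutA nlevels p.2)
      (fun q => pvMaxD q.2 ≠ 0)
      (fun (acc : List (Int × String) × List String) (q : String × List Int) =>
        (acc.1 ++ [(pvMaxD q.2, q.1)],
         if (pvBg3 bigrams nlevels).contains q.1 = false then acc.2 ++ [q.1] else acc.2))
      p.2 ([], st.2)
  simp only [h1]
  have hstep : (fun (acc : List (Int × String) × List String) (q : String × List Int) =>
        if pvMaxD q.2 > pvMincutA nlevels p.2 ∧ pvMaxD q.2 ≠ 0 then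
          (acc.1 ++ [(pvMaxD q.2, q.1)],
           if (pvBg3 bigrams nlevels).contains q.1 = false then acc.2 ++ [q.1] else acc.2)
        else acc)
      = (fun (acc : List (Int × String) × List String) (q : String × List Int) =>
        if pvMaxD q.2 > pvMincutA nlevels p.2 ∧ pvMaxD q.2 ≠ 0 then
          (acc.1 ++ [(pvMaxD q.2, q.1)],
           if q.1 ∈ bigrams.map Prod.fst then acc.2 else acc.2 ++ [q.1])
        else acc) := by
    funext acc q
    by_cases hcond : pvMaxD q.2 > pvMincutA nlevels p.2 ∧ pvMaxD q.2 ≠ 0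
    · rw [if_pos hcond, if_pos hcond, pv_bg3_contains bigrams nlevels hnd]
      by_cases hm : q.1 ∈ bigrams.map Prod.fst
      · simp [hm]
      · simp [hm]
    · rw [if_neg hcond, if_neg hcond]
  rw [hstep, pv_if_flip]

-- ===== VERDICT (by name: the statement is the Claim_ definition above) =====
theorem targetlist_update2_spec : Claim_equal_targetlist_update2 := by
  intro bigrams targs nlevels _hdom hpre
  obtain ⟨-, -, hnd, hinner, -⟩ := hpre
  simp only [Spec_targetlist_update2, targetlist_update2, targetlist_update2_alt]
  have hfold : List.foldl (pvStepA (pvBg3 bigrams nlevels)) (PySem.Dict.mk targs, [])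
        (bigrams.map (fun p => (p.1, pvInnerA (pvMincutA nlevels p.2) p.2)))
      = List.foldl (pvStepB (bigrams.map Prod.fst) nlevels) (PySem.Dict.mk targs, []) bigrams := by
    rw [List.foldl_map]
    apply List.foldl_ext
    intro st p hp
    exact pv_step_eq bigrams nlevels hnd p (hinner p hp) st
  rw [pv_bg3_items bigrams nlevels hnd, hfold]
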